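-- pv_equiv track=rewrite | github.com/xpqz/pylog | prolog/clpfd/domain.py | _middle_out_order
-- ===== SOURCE A (Python) =====
-- def _middle_out_order(values: list[int]) -> list[int]:
--     """Reorder values starting from middle and alternating outward.
--
--     Args:
--         values: List of values in ascending order
--
--     Returns:
--         List reordered starting from middle, alternating left/right
--     """
--     if not values:
--         return []
--
--     if len(values) == 1:
--         return values
--
--     middle_idx = len(values) // 2
--     result = [values[middle_idx]]
--
--     # Add values alternating from middle outward (lower first)
--     for i in range(1, max(middle_idx + 1, len(values) - middle_idx)):
--         if middle_idx - i >= 0: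
--             result.append(values[middle_idx - i])
--         if middle_idx + i < len(values):
--             result.append(values[middle_idx + i])
--
--     return result
-- ===== SOURCE B (Python) =====
-- def _middle_out_order(values: list[int]) -> list[int]:
--     mid = len(values) // 2
--     order = sorted(range(len(values)), key=lambda i: 2 * abs(i - mid) + (i > mid))
--     return [values[i] for i in order]
-- ===== Notes on version B (the rewrite author's own statement) =====
-- stated objective: alternative
-- what changed: Replaces A's alternating outward index loop by sorting the index range with a distance-from-middle key (2*|i-mid| + (i>mid)) and mapping the values through the sorted order; no special cases for empty or singleton lists.
import Mathlib
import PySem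

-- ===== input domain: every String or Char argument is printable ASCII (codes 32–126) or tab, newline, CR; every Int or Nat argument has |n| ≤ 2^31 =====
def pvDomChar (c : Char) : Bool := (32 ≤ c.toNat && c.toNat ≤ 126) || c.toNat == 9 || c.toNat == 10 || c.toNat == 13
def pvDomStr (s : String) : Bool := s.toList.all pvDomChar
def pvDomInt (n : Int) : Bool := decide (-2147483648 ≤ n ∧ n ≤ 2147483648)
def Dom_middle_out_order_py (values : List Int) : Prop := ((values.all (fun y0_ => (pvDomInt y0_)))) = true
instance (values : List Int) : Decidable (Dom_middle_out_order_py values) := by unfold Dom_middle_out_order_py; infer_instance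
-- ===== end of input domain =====

-- B replaces A's alternating outward loop by sorting the indices with a
-- distance-from-middle key and mapping values through that order (alternative algorithm).

-- ===== PORT A =====
def middle_out_order_py (values : List Int) : List Int :=
  if values = [] then []
  else if values.length = 1 then values
  else
    let middle_idx : Int := PySem.Int.floordiv values.length 2
    let result : List Int := [PySem.List.pyGetD values middle_idx 0]
    (PySem.List.pyRange 1 (max (middle_idx + 1) (values.length - middle_idx)) 1).foldl
      (fun acc i =>
        let acc := if 0 ≤ middle_idx - i then acc ++ [PySem.List.pyGetD values (middle_idx - i) 0] else acc
        if middle_idx + i < values.length then acc ++ [PySem.List.pyGetD values (middle_idx + i) 0] else acc)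
      result

-- ===== PORT B =====
def middle_out_order_py_alt (values : List Int) : List Int :=
  let mid : Int := PySem.Int.floordiv values.length 2
  let order := PySem.List.sorted (PySem.List.pyRange 0 values.length 1)
      (fun i => 2 * |i - mid| + (if mid < i then 1 else 0)) false
  order.map (fun i => PySem.List.pyGetD values i 0)

-- ===== PRECONDITION & SPEC =====
def Spec_middle_out_order_py (values : List Int) (out : List Int) : Prop := out = middle_out_order_py_alt values
instance (values : List Int) (out : List Int) : Decidable (Spec_middle_out_order_py values out) := by unfold Spec_middle_out_order_py; infer_instance

-- ===== CLAIM (what is proved, stated in full; the proofs are below) =====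
def Claim_equal_middle_out_order_py : Prop := ∀ (values : List Int), Dom_middle_out_order_py values → Spec_middle_out_order_py values (middle_out_order_py values)

-- ===== LEMMAS AND PROOFS =====

-- B's sort key, named for the proofs
def pvKey (mid i : Int) : Int := 2 * |i - mid| + (if mid < i then 1 else 0)

-- the pair of indices A's loop emits at offset i
def pvStep (mid n i : Int) : List Int :=
  (if 0 ≤ mid - i then [mid - i] else []) ++ (if mid + i < n then [mid + i] else [])

-- the index order A's loop produces
def pvOrder (mid n : Int) : List Int :=
  mid :: (PySem.List.pyRange 1 (max (mid + 1) (n - mid)) 1).flatMap (pvStep mid n)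

theorem pvKey_left (mid a : Int) (h : 0 ≤ a) : pvKey mid (mid - a) = 2 * a := by
  unfold pvKey
  rw [if_neg (by omega), show mid - a - mid = -a by ring, abs_neg, abs_of_nonneg h]
  ring

theorem pvKey_right (mid a : Int) (h : 1 ≤ a) : pvKey mid (mid + a) = 2 * a + 1 := by
  unfold pvKey
  rw [if_pos (by omega), show mid + a - mid = a by ring, abs_of_nonneg (by omega)]

theorem mem_pvStep (mid n i x : Int) :
    x ∈ pvStep mid n i ↔ (x = mid - i ∧ 0 ≤ mid - i) ∨ (x = mid + i ∧ mid + i < n) := by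
  unfold pvStep
  split_ifs <;> simp_all

theorem pvKey_of_mem_pvStep (mid n i x : Int) (hi : 1 ≤ i) (hx : x ∈ pvStep mid n i) :
    pvKey mid x = 2 * i ∨ pvKey mid x = 2 * i + 1 := by
  rcases (mem_pvStep mid n i x).mp hx with ⟨rfl, h⟩ | ⟨rfl, h⟩
  · exact Or.inl (pvKey_left mid i (by omega))
  · exact Or.inr (pvKey_right mid i hi)

theorem pv_flat_pairwise (mid n b : Int) :
    ∀ (t : Nat) (a : Int), 1 ≤ a → (b - a).toNat ≤ t →
      ((PySem.List.pyRange a b 1).flatMap (pvStep mid n)).Pairwise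
          (fun x y => pvKey mid x < pvKey mid y)
      ∧ ∀ x ∈ (PySem.List.pyRange a b 1).flatMap (pvStep mid n), 2 * a ≤ pvKey mid x := by
  intro t
  induction t with
  | zero =>
    intro a ha hb
    rw [PySem.List.pyRange_one_eq_nil (by omega)]
    simp
  | succ t ih =>
    intro a ha hb
    by_cases hab : b ≤ a
    · rw [PySem.List.pyRange_one_eq_nil hab]; simp
    · rw [PySem.List.pyRange_one_cons (by omega), List.flatMap_cons]
      obtain ⟨ihp, ihb⟩ := ih (a + 1) (by omega) (by omega)
      constructor
      · rw [List.pairwise_append]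
        refine ⟨?_, ihp, ?_⟩
        · unfold pvStep
          split_ifs <;>
            simp [pvKey_left mid a (by omega), pvKey_right mid a (by omega)]
        · intro x hx y hy
          have h1 := pvKey_of_mem_pvStep mid n a x ha hx
          have h2 := ihb y hy
          omega
      · intro x hx
        rcases List.mem_append.mp hx with h | h
        · have := pvKey_of_mem_pvStep mid n a x ha h
          omega
        · have := ihb x h
          omega

theorem pvOrder_pairwise (mid n : Int) (_hm : 0 ≤ mid) :
    (pvOrder mid n).Pairwise (fun x y => pvKey mid x < pvKey mid y) := by
  unfold pvOrder
  rw [List.pairwise_cons]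
  obtain ⟨hp, hb⟩ := pv_flat_pairwise mid n (max (mid + 1) (n - mid))
      (max (mid + 1) (n - mid) - 1).toNat 1 (by omega) (by omega)
  refine ⟨fun x hx => ?_, hp⟩
  have h1 := hb x hx
  have h2 : pvKey mid mid = 0 := by
    have := pvKey_left mid 0 (by omega)
    simpa using this
  omega

theorem mem_pvOrder (mid n x : Int) (h2 : 2 * mid ≤ n) (h3 : n ≤ 2 * mid + 1) (hn : 1 ≤ n) :
    x ∈ pvOrder mid n ↔ 0 ≤ x ∧ x < n := by
  unfold pvOrder
  simp only [List.mem_cons, List.mem_flatMap, PySem.List.mem_pyRange_one, mem_pvStep]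
  constructor
  · rintro (rfl | ⟨i, ⟨hi1, hi2⟩, ⟨rfl, h⟩ | ⟨rfl, h⟩⟩) <;> omega
  · rintro ⟨hx0, hxn⟩
    by_cases hxm : x = mid
    · exact Or.inl hxm
    · refine Or.inr ⟨|x - mid|, ?_⟩
      by_cases h : x ≤ mid
      · rw [abs_of_nonpos (by omega)]
        refine ⟨⟨by omega, by omega⟩, Or.inl ⟨by omega, by omega⟩⟩
      · rw [abs_of_nonneg (by omega)]
        refine ⟨⟨by omega, by omega⟩, Or.inr ⟨by omega, by omega⟩⟩

theorem pvOrder_perm (mid n : Int) (h2 : 2 * mid ≤ n) (h3 : n ≤ 2 * mid + 1) (hn : 1 ≤ n) :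
    (pvOrder mid n).Perm (PySem.List.pyRange 0 n 1) := by
  have hnd : (pvOrder mid n).Nodup := by
    have := pvOrder_pairwise mid n (by omega)
    exact this.imp fun h => by rintro rfl; exact lt_irrefl _ h
  rw [List.perm_ext_iff_of_nodup hnd (PySem.List.nodup_pyRange_one 0 n)]
  intro x
  rw [mem_pvOrder mid n x h2 h3 hn, PySem.List.mem_pyRange_one]

theorem pv_sorted_eq (mid n : Int) (h2 : 2 * mid ≤ n) (h3 : n ≤ 2 * mid + 1) (hn : 1 ≤ n) :
    PySem.List.sorted (PySem.List.pyRange 0 n 1) (pvKey mid) false = pvOrder mid n := by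
  apply PySem.List.sorted_eq_of_perm_of_pairwise_lt
  · exact pvOrder_perm mid n h2 h3 hn
  · exact pvOrder_pairwise mid n (by omega)

-- B, for nonempty input, maps values through pvOrder
theorem pv_alt_eq (values : List Int) (hn : 1 ≤ values.length) :
    middle_out_order_py_alt values
      = (pvOrder ((values.length / 2 : Nat) : Int) (values.length : Int)).map
          (fun j => PySem.List.pyGetD values j 0) := by
  unfold middle_out_order_py_alt
  have hfd : PySem.Int.floordiv (values.length : Int) 2 = ((values.length / 2 : Nat) : Int) := by
    rw [PySem.Int.floordiv_eq_ediv_of_pos (by omega)]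
    omega
  simp only [hfd]
  have hkey : (fun i => 2 * |i - ((values.length / 2 : Nat) : Int)|
        + (if ((values.length / 2 : Nat) : Int) < i then 1 else 0))
      = pvKey ((values.length / 2 : Nat) : Int) := by
    funext i; rfl
  rw [hkey, pv_sorted_eq _ _ (by omega) (by omega) (by omega)]

-- A, for input of length ≥ 2, maps values through pvOrder
theorem pv_a_eq (values : List Int) (hn : 2 ≤ values.length) :
    middle_out_order_py values
      = (pvOrder ((values.length / 2 : Nat) : Int) (values.length : Int)).map
          (fun j => PySem.List.pyGetD values j 0) := by
  unfold middle_out_order_py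
  have h0 : values ≠ [] := by rintro rfl; simp at hn
  have h1 : values.length ≠ 1 := by omega
  rw [if_neg h0, if_neg (by simpa using h1)]
  have hfd : PySem.Int.floordiv (values.length : Int) 2 = ((values.length / 2 : Nat) : Int) := by
    rw [PySem.Int.floordiv_eq_ediv_of_pos (by omega)]
    omega
  simp only [hfd]
  set mid : Int := ((values.length / 2 : Nat) : Int) with hmid
  set f : Int → Int := fun j => PySem.List.pyGetD values j 0 with hf
  have hbody : ∀ (acc : List Int) (i : Int),
      (let acc' := if 0 ≤ mid - i then acc ++ [PySem.List.pyGetD values (mid - i) 0] else acc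
       if mid + i < (values.length : Int) then acc' ++ [PySem.List.pyGetD values (mid + i) 0] else acc')
      = acc ++ (pvStep mid (values.length : Int) i).map f := by
    intro acc i
    unfold pvStep
    split_ifs <;> simp [hf]
  calc (PySem.List.pyRange 1 (max (mid + 1) ((values.length : Int) - mid)) 1).foldl
        (fun acc i =>
          let acc := if 0 ≤ mid - i then acc ++ [PySem.List.pyGetD values (mid - i) 0] else acc
          if mid + i < (values.length : Int) then acc ++ [PySem.List.pyGetD values (mid + i) 0] else acc)
        [PySem.List.pyGetD values mid 0]
      = (PySem.List.pyRange 1 (max (mid + 1) ((values.length : Int) - mid)) 1).foldl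
        (fun acc i => acc ++ (pvStep mid (values.length : Int) i).map f)
        [PySem.List.pyGetD values mid 0] := by
        exact PySem.List.foldl_congr_mem _ _ _ _ (fun acc i _ => hbody acc i)
    _ = [PySem.List.pyGetD values mid 0]
        ++ (PySem.List.pyRange 1 (max (mid + 1) ((values.length : Int) - mid)) 1).flatMap
            (fun i => (pvStep mid (values.length : Int) i).map f) := by
        exact PySem.List.foldl_append_eq_flatMap _ _ _
    _ = (pvOrder mid (values.length : Int)).map f := by
        unfold pvOrder
        rw [List.map_cons, List.map_flatMap]
        rfl

-- ===== VERDICT (by name: the statement is the Claim_ definition above) =====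
theorem middle_out_order_py_spec : Claim_equal_middle_out_order_py := by
  intro values _
  unfold Spec_middle_out_order_py
  match h : values with
  | [] => rfl
  | [v] =>
    rw [pv_alt_eq [v] (by simp)]
    simp [middle_out_order_py, pvOrder, PySem.List.pyRange_one_eq_nil]
  | v₁ :: v₂ :: vs =>
    rw [pv_a_eq _ (by simp), pv_alt_eq _ (by simp)]
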